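-- pv_equiv track=rewrite | github.com/james-guevara/synthdnm_python | synthdnm/vcf.py | get_info_features
-- ===== SOURCE A (Python) =====
-- def get_info_features(info_keys, info_column):
--     """Get info features for variant"""
--     info_features = {
--         key: None for key in info_keys
--     }  # Initialize each key's value to None
--     for field in info_column.split(";"):
--         if "=" not in field:
--             continue
--         key, val = field.split("=")
--         if key not in info_keys:
--             continue
--         else:
--             info_features[key] = val
--     return info_features
-- ===== SOURCE B (Python) =====
-- def get_info_features(info_keys, info_column):
--     """Get info features for variant"""
--     fields = info_column.split(";")
--
--     def last_value(key):
--         # scan from the end: the last occurrence wins, like dict overwrite in A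
--         for field in reversed(fields):
--             if "=" in field:
--                 parts = field.split("=")
--                 if parts[0] == key:
--                     return parts[1]
--         return None
--
--     return {key: last_value(key) for key in info_keys}
-- ===== Notes on version B (the rewrite author's own statement) =====
-- stated objective: alternative
-- what changed: B is key-major instead of field-major: it keeps no dict of parsed fields at all, but for each requested key does a reverse linear search of the split fields for the last matching 'key=val' field, whereas A makes one field-major pass updating a pre-initialised dict.
import Mathlib
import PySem

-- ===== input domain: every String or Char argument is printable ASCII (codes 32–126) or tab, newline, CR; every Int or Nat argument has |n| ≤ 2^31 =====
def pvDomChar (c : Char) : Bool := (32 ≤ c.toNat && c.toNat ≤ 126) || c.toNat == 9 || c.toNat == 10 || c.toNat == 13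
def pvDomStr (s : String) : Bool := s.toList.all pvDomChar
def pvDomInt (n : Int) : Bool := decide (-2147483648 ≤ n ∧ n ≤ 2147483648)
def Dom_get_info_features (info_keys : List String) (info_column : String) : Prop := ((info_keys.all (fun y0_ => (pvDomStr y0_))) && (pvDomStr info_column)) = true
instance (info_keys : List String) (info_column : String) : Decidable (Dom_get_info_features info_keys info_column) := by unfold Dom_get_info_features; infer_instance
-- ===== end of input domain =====

-- B is key-major instead of field-major: for each requested key it reverse-searches the
-- split fields for the last 'key=val' match, keeping no dict of parsed fields at all;
-- objective: alternative (same results by a different traversal, similar cost).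


-- ===== PORT A =====
-- s.split(sep) with sep ≠ "" is 'PySem.Str.split? s sep' with its (unreachable) none case
-- defaulted to []; the 'key, val = …' unpacking raises ValueError unless the split has
-- exactly two pieces — those inputs are excluded by Pre_ and the port skips the field there.
def get_info_features (info_keys : List String) (info_column : String) : List (String × Option String) :=
  let info_features : PySem.Dict String (Option String) :=
    info_keys.foldl (fun d key => d.insert key none) PySem.Dict.empty
  let res :=
    ((PySem.Str.split? info_column ";").getD []).foldl (fun d field =>
      if PySem.Str.isIn "=" field = false then d
      else
        match PySem.Str.split? field "=" with
        | some [key, val] =>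
            if info_keys.contains key = false then d
            else d.insert key (some val)
        | _ => d)
      info_features
  res.items

-- ===== PORT B =====
-- Source B's 'last_value': walk reversed(fields), return parts[1] of the first field whose
-- parts[0] equals the key ('parts[1]' cannot raise here: a field containing '=' splits
-- into ≥ 2 pieces; the .getD defaults are the unreachable IndexError cases).
def get_info_features_last_value (key : String) : List String → Option String
  | [] => none
  | field :: rest =>
      if PySem.Str.isIn "=" field then
        let parts := (PySem.Str.split? field "=").getD []
        if parts.getD 0 "" == key then some (parts.getD 1 "")
        else get_info_features_last_value key rest
      else get_info_features_last_value key rest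

def get_info_features_alt (info_keys : List String) (info_column : String) : List (String × Option String) :=
  let fields := (PySem.Str.split? info_column ";").getD []
  (info_keys.foldl
      (fun r key => r.insert key (get_info_features_last_value key fields.reverse))
      PySem.Dict.empty).items

-- ===== PRECONDITION & SPEC =====
-- Pre_ excludes exactly the inputs on which the Python A raises ValueError: some ';'-field
-- containing '=' whose split on '=' does not have exactly two pieces (i.e. two or more '=').
def Pre_get_info_features (info_keys : List String) (info_column : String) : Prop :=
  ∀ field ∈ (PySem.Str.split? info_column ";").getD [],
    PySem.Str.isIn "=" field = true → ((PySem.Str.split? field "=").getD []).length = 2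
instance (info_keys : List String) (info_column : String) : Decidable (Pre_get_info_features info_keys info_column) := by unfold Pre_get_info_features; infer_instance
def pvWitness_get_info_features : List String × String := (["DP", "AF"], "DP=31;MQ=60;AF=0.5")
def Spec_get_info_features (info_keys : List String) (info_column : String) (out : List (String × Option String)) : Prop := out = get_info_features_alt info_keys info_column
instance (info_keys : List String) (info_column : String) (out : List (String × Option String)) : Decidable (Spec_get_info_features info_keys info_column out) := by unfold Spec_get_info_features; infer_instance

-- ===== CLAIM (what is proved, stated in full; the proofs are below) =====
def Claim_equal_get_info_features : Prop := ∀ (info_keys : List String) (info_column : String), Dom_get_info_features info_keys info_column → Pre_get_info_features info_keys info_column → Spec_get_info_features info_keys info_column (get_info_features info_keys info_column)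

-- ===== LEMMAS AND PROOFS =====

-- A's initialisation loop leaves every lookup at `none`.
lemma initA_getD (l : List String) (d : PySem.Dict String (Option String)) (x : String)
    (h : d.getD x none = none) :
    (l.foldl (fun d key => d.insert key none) d).getD x none = none := by
  induction l generalizing d with
  | nil => exact h
  | cons k rest ih =>
      refine ih _ ?_
      rw [PySem.Dict.getD_insert]
      split <;> simp [h]

-- folding B's projection step: lookup is g x once x ∈ l (or already held).
lemma projB_getD (l : List String) (g : String → Option String)
    (d : PySem.Dict String (Option String)) (x : String)
    (h : x ∈ l ∨ d.getD x none = g x) :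
    (l.foldl (fun r key => r.insert key (g key)) d).getD x none = g x := by
  induction l generalizing d with
  | nil => simpa using h.resolve_left (by simp)
  | cons k rest ih =>
      refine ih _ ?_
      by_cases hxk : x = k
      · subst hxk
        right; rw [PySem.Dict.getD_insert]; simp
      · rcases h with h | h
        · rcases List.mem_cons.mp h with h' | h'
          · exact absurd h' hxk
          · exact Or.inl h'
        · right; rw [PySem.Dict.getD_insert]; simp [hxk, h]

-- B's reverse scan over l ++ l': the earlier (in scan order) part wins.
lemma last_value_append (x : String) (l l' : List String) :
    get_info_features_last_value x (l ++ l')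
      = ((get_info_features_last_value x l).or (get_info_features_last_value x l')) := by
  induction l with
  | nil => simp [get_info_features_last_value]
  | cons f rest ih =>
      simp only [List.cons_append, get_info_features_last_value]
      split_ifs <;> simp [ih]

-- one field of A's pass versus B's scan of that single field.
lemma stepA_getD (info_keys : List String) (x : String) (hx : x ∈ info_keys)
    (field : String)
    (hpre : PySem.Str.isIn "=" field = true → ((PySem.Str.split? field "=").getD []).length = 2)
    (dA : PySem.Dict String (Option String)) :
    ((if PySem.Str.isIn "=" field = false then dA
      else
        match PySem.Str.split? field "=" with
        | some [key, val] =>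
            if info_keys.contains key = false then dA
            else dA.insert key (some val)
        | _ => dA).getD x none)
    = (get_info_features_last_value x [field]).or (dA.getD x none) := by
  by_cases hin : PySem.Str.isIn "=" field = true
  · have hinC : PySem.Chars.isIn ['='] field.toList = true := by simpa using hin
    have hlen := hpre hin
    rcases hsp : PySem.Str.split? field "=" with _ | ps
    · rw [hsp] at hlen; simp at hlen
    · rw [hsp] at hlen
      simp only [Option.getD_some] at hlen
      match ps, hlen with
      | [k, v], _ =>
        by_cases hxk : x = k
        · subst hxk
          simp [get_info_features_last_value, hsp, hinC, hx, PySem.Dict.getD_insert_self]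
        · by_cases hck : info_keys.contains k = false
          · have hkn : k ∉ info_keys := by simpa using hck
            simp [get_info_features_last_value, hsp, hinC, hkn, Ne.symm hxk]
          · have hkm : k ∈ info_keys := by simpa using hck
            simp [get_info_features_last_value, hsp, hinC, hkm, Ne.symm hxk,
              PySem.Dict.getD_insert_of_ne dA (some v) none hxk]
  · have hinf : PySem.Str.isIn "=" field = false := by
      cases h : PySem.Str.isIn "=" field
      · rfl
      · exact absurd h hin
    have hinC : PySem.Chars.isIn ['='] field.toList = false := by simpa using hinf
    rw [if_pos hinf]
    simp [get_info_features_last_value, hinC]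

-- the key relation: A's filtered field-major pass stores, at a requested key x, exactly
-- what B's reverse scan of the same fields finds (or what the accumulator already held).
lemma foldA_getD (fields : List String) (info_keys : List String) (x : String)
    (hx : x ∈ info_keys)
    (hpre : ∀ f ∈ fields, PySem.Str.isIn "=" f = true → ((PySem.Str.split? f "=").getD []).length = 2)
    (dA : PySem.Dict String (Option String)) :
    ((fields.foldl (fun d field =>
        if PySem.Str.isIn "=" field = false then d
        else
          match PySem.Str.split? field "=" with
          | some [key, val] =>
              if info_keys.contains key = false then d
              else d.insert key (some val)
          | _ => d) dA).getD x none)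
    = (get_info_features_last_value x fields.reverse).or (dA.getD x none) := by
  induction fields generalizing dA with
  | nil => simp [get_info_features_last_value]
  | cons field rest ih =>
      have hpre' : ∀ f ∈ rest, PySem.Str.isIn "=" f = true → ((PySem.Str.split? f "=").getD []).length = 2 :=
        fun f hf => hpre f (List.mem_cons_of_mem _ hf)
      rw [List.foldl_cons, ih hpre' _, List.reverse_cons, last_value_append, Option.or_assoc]
      exact congrArg _ (stepA_getD info_keys x hx field (hpre field (by simp)) dA)

-- A's update pass never adds a key: its keys stay those of the initial dict.
lemma keysA_fixed (fields : List String) (info_keys : List String)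
    (dA : PySem.Dict String (Option String))
    (hsub : ∀ k ∈ info_keys, dA.contains k = true) :
    (fields.foldl (fun d field =>
        if PySem.Str.isIn "=" field = false then d
        else
          match PySem.Str.split? field "=" with
          | some [key, val] =>
              if info_keys.contains key = false then d
              else d.insert key (some val)
          | _ => d) dA).keys = dA.keys := by
  induction fields generalizing dA with
  | nil => rfl
  | cons field rest ih =>
      rw [List.foldl_cons]
      by_cases hin : PySem.Str.isIn "=" field = false
      · simp only [hin, if_true]; exact ih _ hsub
      · simp only [hin, Bool.true_eq_false, if_false]
        rcases hsp : PySem.Str.split? field "=" with _ | ⟨_ | ⟨k, _ | ⟨v, _ | ⟨w, tl⟩⟩⟩⟩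
        · exact ih _ hsub
        · exact ih _ hsub
        · exact ih _ hsub
        · by_cases hc : info_keys.contains k = false
          · simp only [hc, if_true]; exact ih _ hsub
          · simp only [hc]
            have hkmem : k ∈ info_keys := by
              have := (Bool.not_eq_false _).mp hc
              simpa using this
            have hck : dA.contains k = true := hsub k hkmem
            have hkeys : (dA.insert k (some v)).keys = dA.keys :=
              PySem.Dict.keys_insert_of_contains dA (some v) hck
            have hsub' : ∀ j ∈ info_keys, (dA.insert k (some v)).contains j = true := by
              intro j hj
              rw [PySem.Dict.contains_insert]
              simp [hsub j hj]
            simp only [Bool.true_eq_false, if_false]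
            rw [ih _ hsub', hkeys]
        · exact ih _ hsub

-- ===== VERDICT (by name: the statement is the Claim_ definition above) =====
theorem get_info_features_spec : Claim_equal_get_info_features := by
  intro info_keys info_column _ hpre
  unfold Spec_get_info_features get_info_features get_info_features_alt
  set fields := (PySem.Str.split? info_column ";").getD [] with hfields
  set init : PySem.Dict String (Option String) :=
    info_keys.foldl (fun d key => d.insert key none) PySem.Dict.empty with hinit
  set resA := fields.foldl (fun d field =>
      if PySem.Str.isIn "=" field = false then d
      else
        match PySem.Str.split? field "=" with
        | some [key, val] =>
            if info_keys.contains key = false then d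
            else d.insert key (some val)
        | _ => d) init with hresA
  set resB := info_keys.foldl
      (fun r key => r.insert key (get_info_features_last_value key fields.reverse))
      PySem.Dict.empty with hresB
  have hkinit : init.keys = PySem.Set.ofList info_keys := by
    rw [hinit, PySem.Dict.keys_foldl_insert info_keys (fun _ _ => none)]
    simp [PySem.Set.update_nil_left]
  have hcinit : ∀ k ∈ info_keys, init.contains k = true := by
    intro k hk
    rw [PySem.Dict.contains_iff_mem_keys, hkinit]
    exact (PySem.Set.mem_ofList _ _).mpr hk
  have hkA : resA.keys = PySem.Set.ofList info_keys := by
    rw [hresA, keysA_fixed fields info_keys init hcinit, hkinit]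
  have hkB : resB.keys = PySem.Set.ofList info_keys := by
    rw [hresB, PySem.Dict.keys_foldl_insert info_keys
      (fun _ key => get_info_features_last_value key fields.reverse)]
    simp [PySem.Set.update_nil_left]
  have hnA : resA.keys.Nodup := by rw [hkA]; exact PySem.Set.nodup_ofList info_keys
  have hnB : resB.keys.Nodup := by rw [hkB]; exact PySem.Set.nodup_ofList info_keys
  rw [PySem.Dict.items_eq_map_keys resA hnA none, PySem.Dict.items_eq_map_keys resB hnB none,
    hkA, hkB]
  refine List.map_congr_left ?_
  intro k hk
  have hkmem : k ∈ info_keys := (PySem.Set.mem_ofList _ _).mp hk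
  have hvA : resA.getD k none = get_info_features_last_value k fields.reverse := by
    rw [hresA, foldA_getD fields info_keys k hkmem hpre init,
      initA_getD info_keys PySem.Dict.empty k (by simp [PySem.Dict.getD_empty]), Option.or_none]
  have hvB : resB.getD k none = get_info_features_last_value k fields.reverse := by
    rw [hresB]
    exact projB_getD info_keys (fun j => get_info_features_last_value j fields.reverse)
      PySem.Dict.empty k (Or.inl hkmem)
  rw [hvA, hvB]
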